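-- pv_equiv track=rewrite | github.com/at-industries/token-sender | utils/utils.py | create_options_table
-- ===== SOURCE A (Python) =====
-- def create_options_table(options: list[str], values_in_row: int = 5) -> str:
--     values = options.copy()
--     max_len_item = len(max(values, key=len))
--     for i in range(len(values)):
--         values[i] += ' ' * (max_len_item - len(values[i]))
--     separator = ' | '
--     starter = '| '
--     finisher = ' |'
--     len_line = len(separator) * (len(values[:values_in_row]) - 1) + len(finisher) + len(starter) + max_len_item * len(values[:values_in_row])
--     line = '-' * len_line
--     start_line = line + '\n| '
--     finish_line = '\n' + line
--     options_table = start_line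
--     for i in range(1, len(values) + 1):
--         index = i - 1
--         options_table += values[index]
--         if i % values_in_row <= values_in_row-1:
--             options_table += separator
--         if i % values_in_row == 0:
--             options_table += '\n' + starter
--     if len(values) % values_in_row == 0 and len(values) >= values_in_row:
--         options_table = options_table[:-len('\n' + starter)]
--     options_table += finish_line
--     return options_table
-- ===== SOURCE B (Python) =====
-- def create_options_table(options: list[str], values_in_row: int = 5) -> str:
--     max_len = max(len(o) for o in options)
--     values = [o.ljust(max_len) for o in options]
--     rows = [values[i:i + values_in_row] for i in range(0, len(values), values_in_row)]
--     k = min(len(values), values_in_row)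
--     line = '-' * (3 * (k - 1) + 4 + max_len * k)
--     body = '\n'.join('| ' + ''.join(v + ' | ' for v in row) for row in rows)
--     return line + '\n' + body + '\n' + line
-- ===== Notes on version B (the rewrite author's own statement) =====
-- stated objective: simpler
-- what changed: Replaces A's modular-counter flat loop with per-item separator/newline decisions and a post-hoc negative-slice trim by chunking the padded values into rows and joining them with '\n' (the separator line computed once from the first row's column count).
-- outside the precondition, e.g. on create_options_table([], 5): A raises ValueError, B raises ValueError; on create_options_table(['a'], 0): A raises ZeroDivisionError, B raises ValueError; on create_options_table(['a', 'bb'], -1): A returns '------\n| a \n| bb\n------', B returns '\n\n'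
import Mathlib
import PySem

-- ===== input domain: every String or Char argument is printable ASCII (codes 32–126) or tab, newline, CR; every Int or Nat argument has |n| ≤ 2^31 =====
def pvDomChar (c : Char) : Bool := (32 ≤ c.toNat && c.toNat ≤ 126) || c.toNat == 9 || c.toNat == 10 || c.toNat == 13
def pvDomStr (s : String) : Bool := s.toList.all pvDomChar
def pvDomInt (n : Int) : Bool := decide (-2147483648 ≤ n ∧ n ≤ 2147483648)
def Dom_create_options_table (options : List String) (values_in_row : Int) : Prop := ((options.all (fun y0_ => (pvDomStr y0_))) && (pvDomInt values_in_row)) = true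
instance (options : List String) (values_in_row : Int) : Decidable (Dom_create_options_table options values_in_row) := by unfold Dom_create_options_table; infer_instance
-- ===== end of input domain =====

-- B replaces A's modular-counter flat loop (and its post-hoc negative-slice trim) by
-- chunking the padded values into rows and joining them with newlines: a simpler decomposition.

-- ===== PORT A =====
-- Strings are handled on the List Char side (PySem convention); the returned String wraps the final list.
def create_options_table (options : List String) (values_in_row : Int) : String :=
  let values : List (List Char) := options.map String.toList
  let max_len_item : Int := ((PySem.List.maxD values (fun v => (v.length : Int)) []).length : Int)
  let values := values.map (fun v => v ++ List.replicate (max_len_item - (v.length : Int)).toNat ' ')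
  let separator : List Char := [' ', '|', ' ']
  let starter : List Char := ['|', ' ']
  let finisher : List Char := [' ', '|']
  let firstRow := PySem.List.slice values none (some values_in_row)
  let len_line : Int := (separator.length : Int) * ((firstRow.length : Int) - 1) +
    (finisher.length : Int) + (starter.length : Int) + max_len_item * (firstRow.length : Int)
  let line : List Char := List.replicate len_line.toNat '-'
  let start_line := line ++ '\n' :: starter
  let finish_line := '\n' :: line
  let table := (PySem.List.pyRange 1 ((values.length : Int) + 1) 1).foldl (fun acc i =>
    let acc := acc ++ PySem.List.pyGetD values (i - 1) []
    let acc := if PySem.Int.mod i values_in_row ≤ values_in_row - 1 then acc ++ separator else acc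
    if PySem.Int.mod i values_in_row = 0 then acc ++ '\n' :: starter else acc) start_line
  let table := if PySem.Int.mod ((values.length : Int)) values_in_row = 0 ∧ values_in_row ≤ ((values.length : Int))
    then PySem.List.slice table none (some (-((('\n' :: starter).length : Int)))) else table
  String.ofList (table ++ finish_line)

-- ===== PORT B =====
def create_options_table_alt (options : List String) (values_in_row : Int) : String :=
  let max_len : Int := (PySem.List.max? (options.map (fun o => (o.toList.length : Int))) id).getD 0
  let values : List (List Char) :=
    options.map (fun o => o.toList ++ List.replicate (max_len - (o.toList.length : Int)).toNat ' ')
  let rows := (PySem.List.pyRange 0 ((values.length : Int)) values_in_row).map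
    (fun i => PySem.List.slice values (some i) (some (i + values_in_row)))
  let k : Int := min ((values.length : Int)) values_in_row
  let line : List Char := List.replicate (3 * (k - 1) + 4 + max_len * k).toNat '-'
  let body := PySem.Chars.join ['\n']
    (rows.map (fun row => ['|', ' '] ++ PySem.Chars.join [] (row.map (fun v => v ++ [' ', '|', ' ']))))
  String.ofList (line ++ '\n' :: (body ++ '\n' :: line))

-- ===== PRECONDITION & SPEC =====
-- Pre_ excludes empty options (A raises ValueError in max()) and values_in_row ≤ 0
-- (values_in_row = 0 raises ZeroDivisionError; for negative values_in_row A's negative-modulo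
-- layout is an accidental corner no caller would specify, and B returns a degenerate string there).
def Pre_create_options_table (options : List String) (values_in_row : Int) : Prop :=
  options ≠ [] ∧ 1 ≤ values_in_row
instance (options : List String) (values_in_row : Int) : Decidable (Pre_create_options_table options values_in_row) := by unfold Pre_create_options_table; infer_instance

def pvWitness_create_options_table : List String × Int := (["ab", "c", "ddd"], 2)

def Spec_create_options_table (options : List String) (values_in_row : Int) (out : String) : Prop := out = create_options_table_alt options values_in_row
instance (options : List String) (values_in_row : Int) (out : String) : Decidable (Spec_create_options_table options values_in_row out) := by unfold Spec_create_options_table; infer_instance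

-- ===== CLAIM (what is proved, stated in full; the proofs are below) =====
def Claim_equal_create_options_table : Prop := ∀ (options : List String) (values_in_row : Int), Dom_create_options_table options values_in_row → Pre_create_options_table options values_in_row → Spec_create_options_table options values_in_row (create_options_table options values_in_row)

-- ===== LEMMAS AND PROOFS =====

-- cells of one row: exactly B's inner join
def pvCells (row : List (List Char)) : List Char :=
  PySem.Chars.join [] (row.map (fun v => v ++ [' ', '|', ' ']))

theorem pvCells_nil : pvCells [] = [] := rfl

theorem pvCells_cons (x : List Char) (t : List (List Char)) :
    pvCells (x :: t) = x ++ [' ', '|', ' '] ++ pvCells t := by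
  cases t <;> simp [pvCells, PySem.Chars.join, List.intercalate]

-- the rows of the table: chunks of size v'
def pvChunks (v' : Nat) : List (List Char) → List (List (List Char))
  | [] => []
  | x :: t => ((x :: t).take v') :: pvChunks v' (t.drop (v' - 1))
  termination_by l => l.length
  decreasing_by simp [List.length_drop]

theorem pvChunks_nil (v' : Nat) : pvChunks v' [] = [] := by rw [pvChunks]

theorem pvChunks_cons (v' : Nat) (hv : 1 ≤ v') (x : List Char) (t : List (List Char)) :
    pvChunks v' (x :: t) = ((x :: t).take v') :: pvChunks v' ((x :: t).drop v') := by
  rw [pvChunks]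
  congr 1
  cases v' with
  | zero => omega
  | succ m => simp only [List.drop_succ_cons, Nat.add_sub_cancel]

-- A's flat loop, rephrased with a slots-left-in-row countdown
def pvRecDown (v' : Nat) : List (List Char) → Nat → List Char
  | [], _ => []
  | x :: t, k => x ++ [' ', '|', ' '] ++
      (if k = 1 then ['\n', '|', ' '] ++ pvRecDown v' t v' else pvRecDown v' t (k - 1))

theorem pvSucc_mod (v' a : Nat) (h : 0 < v') :
    (a + 1) % v' = if a % v' = v' - 1 then 0 else a % v' + 1 := by
  have hr : a % v' < v' := Nat.mod_lt _ h
  have h2 : (a + 1) % v' = (a % v' + 1) % v' := by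
    conv_lhs => rw [← Nat.mod_add_mod]
  by_cases hc : a % v' = v' - 1
  · rw [if_pos hc, h2, hc]
    have : v' - 1 + 1 = v' := by omega
    rw [this, Nat.mod_self]
  · rw [if_neg hc, h2, Nat.mod_eq_of_lt (by omega)]

theorem pvModZero_iff (v : Int) (hv : 0 < v) (m : Nat) :
    PySem.Int.mod ((m : Nat) : Int) v = 0 ↔ v.toNat ∣ m := by
  rw [PySem.Int.mod_eq_zero_iff_dvd]
  constructor
  · intro h
    have : ((v.toNat : Int)) ∣ (m : Int) := by rwa [Int.toNat_of_nonneg (le_of_lt hv)]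
    exact_mod_cast this
  · intro h
    have : ((v.toNat : Int)) ∣ ((m : Nat) : Int) := Int.natCast_dvd_natCast.mpr h
    rwa [Int.toNat_of_nonneg (le_of_lt hv)] at this

theorem pvFoldA (P : List (List Char)) (v : Int) (hv : 0 < v) :
    ∀ (t : List (List Char)) (a : Nat) (acc : List Char),
      t = P.drop a → a ≤ P.length →
      (PySem.List.pyRange ((a : Int) + 1) ((P.length : Int) + 1) 1).foldl (fun acc i =>
        let acc := acc ++ PySem.List.pyGetD P (i - 1) []
        let acc := if PySem.Int.mod i v ≤ v - 1 then acc ++ [' ', '|', ' '] else acc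
        if PySem.Int.mod i v = 0 then acc ++ '\n' :: ['|', ' '] else acc) acc
      = acc ++ pvRecDown v.toNat t (v.toNat - a % v.toNat) := by
  intro t
  induction t with
  | nil =>
    intro a acc ht ha
    have hal : P.length ≤ a := by
      have := List.drop_eq_nil_iff.mp ht.symm
      omega
    rw [PySem.List.pyRange_one_eq_nil (by omega : ((P.length : Int) + 1) ≤ (a : Int) + 1)]
    simp [pvRecDown]
  | cons x t ih =>
    intro a acc ht ha
    have hvn : 0 < v.toNat := by omega
    have halt : a < P.length := by
      by_contra hc
      rw [List.drop_eq_nil_iff.mpr (by omega)] at ht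
      simp at ht
    have hcons : PySem.List.pyRange ((a : Int) + 1) ((P.length : Int) + 1) 1 =
        ((a : Int) + 1) :: PySem.List.pyRange ((a : Int) + 1 + 1) ((P.length : Int) + 1) 1 :=
      PySem.List.pyRange_one_cons (by omega)
    rw [hcons, List.foldl_cons]
    have hget : PySem.List.pyGetD P ((a : Int) + 1 - 1) [] = x := by
      have h1 : ((a : Int) + 1 - 1) = ((a : Nat) : Int) := by omega
      rw [h1, PySem.List.pyGetD_natCast]
      have hPa : P[a]? = some x := by
        rw [← List.head?_drop, ← ht]; rfl
      rw [List.getD_eq_getElem?_getD, hPa]; rfl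
    have ht' : t = P.drop (a + 1) := by
      have : P.drop (a + 1) = (P.drop a).tail := by
        rw [← List.drop_drop, List.drop_one]
      rw [this, ← ht]; rfl
    have hle : PySem.Int.mod ((a : Int) + 1) v ≤ v - 1 := by
      have := PySem.Int.mod_lt ((a : Int) + 1) hv; omega
    have h1le : (1 : Int) ≤ v := hv
    have hcast : ((a : Int) + 1) = (((a + 1 : Nat)) : Int) := by push_cast; ring
    have hmodlt : a % v.toNat < v.toNat := Nat.mod_lt _ hvn
    have hcast2 : (a : Int) + 1 + 1 = (((a + 1 : Nat)) : Int) + 1 := by push_cast; ring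
    by_cases hd : a % v.toNat = v.toNat - 1
    · have hz : PySem.Int.mod ((a : Int) + 1) v = 0 := by
        rw [hcast]
        exact (pvModZero_iff v hv (a + 1)).mpr (by
          have := pvSucc_mod v.toNat a hvn
          rw [if_pos hd] at this
          exact (Nat.dvd_iff_mod_eq_zero.mpr this))
      simp only [hget, hz, if_pos]
      rw [if_pos (by omega : (0:Int) ≤ v - 1), hcast2, ih (a + 1) _ ht' (by omega)]
      have hk1 : v.toNat - a % v.toNat = 1 := by omega
      have hmod1 : (a + 1) % v.toNat = 0 := by
        have := pvSucc_mod v.toNat a hvn; rw [if_pos hd] at this; exact this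
      rw [hk1, hmod1, pvRecDown]
      simp
    · have hz : ¬ PySem.Int.mod ((a : Int) + 1) v = 0 := by
        rw [hcast]
        intro hc
        have := (pvModZero_iff v hv (a + 1)).mp hc
        have h2 := pvSucc_mod v.toNat a hvn
        rw [if_neg hd] at h2
        have := Nat.dvd_iff_mod_eq_zero.mp this
        omega
      simp only [hget, hz, hle, if_pos, if_false]
      rw [hcast2, ih (a + 1) _ ht' (by omega)]
      have hmod1 : (a + 1) % v.toNat = a % v.toNat + 1 := by
        have := pvSucc_mod v.toNat a hvn; rw [if_neg hd] at this; exact this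
      have hk : v.toNat - a % v.toNat ≠ 1 := by omega
      rw [pvRecDown, if_neg hk, hmod1]
      have : v.toNat - (a % v.toNat + 1) = v.toNat - a % v.toNat - 1 := by omega
      rw [this]
      simp

theorem pvRecDown_row (v' : Nat) :
    ∀ (t : List (List Char)) (k : Nat), 1 ≤ k →
      pvRecDown v' t k = if t.length < k then pvCells t
        else pvCells (t.take k) ++ ['\n', '|', ' '] ++ pvRecDown v' (t.drop k) v' := by
  intro t
  induction t with
  | nil => intro k hk; simp [pvRecDown, pvCells_nil, Nat.lt_of_lt_of_le Nat.zero_lt_one hk]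
  | cons x t ih =>
    intro k hk
    by_cases h1 : k = 1
    · subst h1
      simp [pvRecDown, pvCells_cons, pvCells_nil]
    · have hk2 : 2 ≤ k := by omega
      have := ih (k - 1) (by omega)
      rw [pvRecDown, if_neg h1, this]
      by_cases hlt : t.length < k - 1
      · rw [if_pos hlt, if_pos (by simp only [List.length_cons]; omega), pvCells_cons]
      · rw [if_neg hlt, if_neg (by simp only [List.length_cons]; omega)]
        have htk : (x :: t).take k = x :: t.take (k - 1) := by
          cases k with
          | zero => omega
          | succ m => simp only [List.take_succ_cons, Nat.add_sub_cancel]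
        have hdk : (x :: t).drop k = t.drop (k - 1) := by
          cases k with
          | zero => omega
          | succ m => simp only [List.drop_succ_cons, Nat.add_sub_cancel]
        rw [htk, hdk, pvCells_cons]
        simp [List.append_assoc]

theorem pvRecDown_chunks (v' : Nat) (hv : 1 ≤ v') :
    ∀ (n : Nat) (t : List (List Char)), t.length = n → t ≠ [] →
      ['|', ' '] ++ pvRecDown v' t v' =
        PySem.Chars.join ['\n'] ((pvChunks v' t).map (fun r => ['|', ' '] ++ pvCells r)) ++
          (if v' ∣ t.length then ['\n', '|', ' '] else []) := by
  intro n
  induction n using Nat.strong_induction_on with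
  | h n ih =>
    intro t hn hne
    obtain ⟨x, t0, rfl⟩ := List.exists_cons_of_ne_nil hne
    rw [pvRecDown_row v' _ v' hv, pvChunks_cons v' hv]
    by_cases hshort : (x :: t0).length < v'
    · rw [if_pos hshort]
      have hdrop : (x :: t0).drop v' = [] := by
        simp only [List.drop_eq_nil_iff]; omega
      have htake : (x :: t0).take v' = x :: t0 := List.take_of_length_le (by omega)
      have hnd : ¬ v' ∣ (x :: t0).length := by
        intro hd
        have := Nat.le_of_dvd (by simp) hd
        omega
      rw [hdrop, htake, if_neg hnd, pvChunks_nil]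
      simp only [List.map_cons, List.map_nil]
      rw [PySem.Chars.join_singleton]
      simp
    · rw [if_neg hshort]
      by_cases hrest : (x :: t0).drop v' = []
      · -- length exactly v'
        have hlen : (x :: t0).length = v' := by
          have := List.drop_eq_nil_iff.mp hrest
          omega
        have htake : (x :: t0).take v' = x :: t0 := List.take_of_length_le (by omega)
        rw [hrest, htake, if_pos (hlen ▸ dvd_refl v'), pvChunks_nil]
        simp only [List.map_cons, List.map_nil]
        rw [PySem.Chars.join_singleton]
        simp [pvRecDown]
      · -- at least one more chunk
        have hlenge : v' ≤ (x :: t0).length := by omega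
        have ihr := ih ((x :: t0).drop v').length
          (by rw [← hn]; simp only [List.length_drop]; omega)
          ((x :: t0).drop v') rfl hrest
        obtain ⟨c, cs, hcc⟩ := List.exists_cons_of_ne_nil
          (show pvChunks v' ((x :: t0).drop v') ≠ [] by
            obtain ⟨y, ys, hys⟩ := List.exists_cons_of_ne_nil hrest
            rw [hys, pvChunks]; simp)
        rw [hcc] at ihr ⊢
        simp only [List.map_cons]
        rw [PySem.Chars.join_cons_cons]
        have hdvd : (v' ∣ (x :: t0).length) ↔ (v' ∣ ((x :: t0).drop v').length) := by
          simp only [List.length_drop]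
          constructor
          · intro h; exact Nat.dvd_sub h (dvd_refl v')
          · intro h
            have := Nat.dvd_add h (dvd_refl v')
            rwa [Nat.sub_add_cancel hlenge] at this
        simp only [hdvd]
        simp only [List.map_cons] at ihr
        calc ['|', ' '] ++ (pvCells ((x :: t0).take v') ++ ['\n', '|', ' '] ++ pvRecDown v' ((x :: t0).drop v') v')
            = ['|', ' '] ++ pvCells ((x :: t0).take v') ++ ['\n'] ++ (['|', ' '] ++ pvRecDown v' ((x :: t0).drop v') v') := by simp
          _ = ['|', ' '] ++ pvCells ((x :: t0).take v') ++ ['\n'] ++ (PySem.Chars.join ['\n'] ((['|', ' '] ++ pvCells c) :: cs.map (fun r => ['|', ' '] ++ pvCells r)) ++ if v' ∣ ((x :: t0).drop v').length then ['\n', '|', ' '] else []) := by rw [ihr]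
          _ = _ := by simp

-- one cons-step of a positive-step pyRange starting at 0
theorem pvRange_pos_step (v b : Int) (hv : 0 < v) (hb : 0 < b) :
    PySem.List.pyRange 0 b v = 0 :: (PySem.List.pyRange 0 (b - v) v).map (· + v) := by
  rw [PySem.List.pyRange_of_pos _ _ hv, PySem.List.pyRange_of_pos _ _ hv]
  rw [if_pos (by omega : (0:Int) < b)]
  have hstep : (b - 0 + v - 1) / v = (b - v - 0 + v - 1) / v + 1 := by
    have h1 : b - 0 + v - 1 = (b - 1) + 1 * v := by ring
    have h2 : b - v - 0 + v - 1 = b - 1 := by ring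
    rw [h1, h2, Int.add_mul_ediv_right _ _ (by omega : v ≠ 0)]
  by_cases hbv : 0 < b - v
  · rw [if_pos hbv, hstep]
    have hnn : 0 ≤ (b - v - 0 + v - 1) / v := Int.ediv_nonneg (by omega) (by omega)
    have htn : ((b - v - 0 + v - 1) / v + 1).toNat = ((b - v - 0 + v - 1) / v).toNat + 1 := by omega
    rw [htn, List.range_succ_eq_map]
    simp only [List.map_cons, List.map_map]
    congr 1
    · simp
    · apply List.map_congr_left
      intro k _
      simp [Function.comp]
      ring
  · rw [if_neg hbv]
    have h0 : (b - v - 0 + v - 1) / v = 0 := by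
      have h2 : b - v - 0 + v - 1 = b - 1 := by ring
      rw [h2]
      exact Int.ediv_eq_zero_of_lt (by omega) (by omega)
    have h1 : (b - 0 + v - 1) / v = 1 := by rw [hstep, h0]; ring
    rw [h1]
    simp


theorem pvRows_chunks (v : Int) (hv : 0 < v) :
    ∀ (n : Nat) (P : List (List Char)), P.length = n →
      (PySem.List.pyRange 0 ((P.length : Int)) v).map
        (fun i => PySem.List.slice P (some i) (some (i + v))) = pvChunks v.toNat P := by
  intro n
  induction n using Nat.strong_induction_on with
  | _ n ih =>
    intro P hn
    cases P with
    | nil =>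
      rw [PySem.List.pyRange_of_pos _ _ hv]
      simp [pvChunks_nil]
    | cons x t =>
      have hb : (0:Int) < ((x :: t).length : Int) := by simp
      rw [pvRange_pos_step v _ hv hb, List.map_cons, List.map_map]
      rw [pvChunks_cons v.toNat (by omega) x t]
      congr 1
      · -- head chunk
        have : PySem.List.slice (x :: t) (some 0) (some (0 + v)) = (x :: t).take v.toNat := by
          rw [PySem.List.slice_toNat _ (le_refl 0) (by omega)]
          simp
        rw [this]
      · -- tail chunks
        by_cases hvlen : (x :: t).length ≤ v.toNat
        · have hdr : (x :: t).drop v.toNat = [] := List.drop_eq_nil_iff.mpr hvlen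
          rw [hdr, pvChunks_nil, PySem.List.pyRange_of_pos _ _ hv]
          rw [if_neg (show ¬ ((0:Int) < ((x :: t).length : Int) - v) by
            simp only [List.length_cons] at hvlen ⊢; omega)]
          simp
        · have hdl : ((x :: t).drop v.toNat).length = (x :: t).length - v.toNat := by
            simp
          have ihr := ih ((x :: t).drop v.toNat).length
            (by simp only [List.length_drop, List.length_cons] at hn ⊢; omega)
            ((x :: t).drop v.toNat) rfl
          rw [← ihr]
          have hcast : ((x :: t).length : Int) - v = (((x :: t).drop v.toNat).length : Int) := by
            rw [hdl]; omega
          rw [hcast]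
          apply List.map_congr_left
          intro i hi
          have hmem := (PySem.List.mem_pyRange_iff_of_pos hv i).mp hi
          simp only [Function.comp]
          rw [PySem.List.slice_toNat _ (by omega) (by omega),
              PySem.List.slice_toNat _ (by omega) (by omega)]
          rw [List.drop_drop]
          congr 1
          · omega
          · congr 1
            omega

-- the value of Python max(..., key=len): A's and B's computations agree
theorem pvMaxVal (xs : List (List Char)) (key : List Char → Int) (hne : xs ≠ []) :
    (PySem.List.max? (xs.map key) id).getD 0 = key (PySem.List.maxD xs key []) := by
  have hA := PySem.List.max?_eq_some_maxD xs key [] hne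
  obtain ⟨MB, hB⟩ : ∃ MB, PySem.List.max? (xs.map key) id = some MB := by
    cases h : PySem.List.max? (xs.map key) id with
    | none =>
      rw [PySem.List.max?_eq_none_iff] at h
      simp [hne] at h
    | some m => exact ⟨m, rfl⟩
  rw [hB]
  have hmemB := PySem.List.max?_mem hB
  obtain ⟨z, hz, hzv⟩ := List.mem_map.mp hmemB
  have hmaxB := PySem.List.max?_isMax hB
  have hmaxA := PySem.List.max?_isMax hA
  have h1 : MB ≤ key (PySem.List.maxD xs key []) := by
    rw [← hzv]; exact hmaxA z hz
  have h2 : key (PySem.List.maxD xs key []) ≤ MB := by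
    have := hmaxB (key (PySem.List.maxD xs key []))
      (List.mem_map.mpr ⟨_, PySem.List.max?_mem hA, rfl⟩)
    simpa using this
  simp only [Option.getD_some]
  omega

-- pvFoldA specialised to the loop as it appears in the port (start index 0, zeta-reduced body)
theorem pvFoldA0 (P : List (List Char)) (v : Int) (hv : 0 < v) (acc : List Char) :
    (PySem.List.pyRange 1 ((P.length : Int) + 1) 1).foldl (fun acc i =>
      if PySem.Int.mod i v = 0 then
        (if PySem.Int.mod i v ≤ v - 1 then acc ++ PySem.List.pyGetD P (i - 1) [] ++ [' ', '|', ' ']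
          else acc ++ PySem.List.pyGetD P (i - 1) []) ++ ['\n', '|', ' ']
      else
        if PySem.Int.mod i v ≤ v - 1 then acc ++ PySem.List.pyGetD P (i - 1) [] ++ [' ', '|', ' ']
        else acc ++ PySem.List.pyGetD P (i - 1) []) acc
    = acc ++ pvRecDown v.toNat P v.toNat := by
  have h := pvFoldA P v hv P 0 acc (by simp) (by simp)
  have h1 : (((0:Nat) : Int) + 1) = 1 := by norm_num
  rw [h1] at h
  have h2 : v.toNat - 0 % v.toNat = v.toNat := by rw [Nat.zero_mod, Nat.sub_zero]
  rw [h2] at h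
  exact h

-- ===== VERDICT (by name: the statement is the Claim_ definition above) =====
theorem create_options_table_spec : Claim_equal_create_options_table := by
  intro options v _ hpre
  obtain ⟨hne, hv1⟩ := hpre
  have hv : (0:Int) < v := by omega
  have hvn : 0 < v.toNat := by omega
  unfold Spec_create_options_table create_options_table create_options_table_alt
  simp only []
  set key : List Char → Int := fun w => (w.length : Int) with hkey
  set xs : List (List Char) := options.map String.toList with hxs
  have hxne : xs ≠ [] := by simpa [hxs] using hne
  -- the two max computations agree
  have hmaps : options.map (fun o => ((o.toList.length : Nat) : Int)) = xs.map key := by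
    simp [hxs, hkey, List.map_map, Function.comp]
  rw [hmaps, pvMaxVal xs key hxne]
  simp only [hkey]
  have hpad : List.map (fun o => o.toList ++
        List.replicate (((PySem.List.maxD xs (fun w => ((w.length : Nat) : Int)) []).length : Int) - ((o.toList.length : Nat) : Int)).toNat ' ') options
      = List.map (fun w => w ++
        List.replicate (((PySem.List.maxD xs (fun w => ((w.length : Nat) : Int)) []).length : Int) - ((w.length : Nat) : Int)).toNat ' ') xs := by
    rw [hxs, List.map_map]
    rfl
  rw [hpad]
  set M : Int := ((PySem.List.maxD xs (fun w => ((w.length : Nat) : Int)) []).length : Int) with hM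
  set P : List (List Char) := xs.map (fun w => w ++ List.replicate (M - ((w.length : Nat) : Int)).toNat ' ') with hP
  have hPlen : P.length = xs.length := by rw [hP, List.length_map]
  have hPpos : 0 < P.length := by
    rw [hPlen]
    exact List.length_pos_of_ne_nil hxne
  have hPne : P ≠ [] := by
    intro hc; rw [hc] at hPpos; simp at hPpos
  -- the separator line has the same width on both sides
  have hslice : PySem.List.slice P none (some v) = P.take v.toNat :=
    PySem.List.slice_to _ (le_of_lt hv)
  rw [hslice]
  have hmin : ((P.take v.toNat).length : Int) = min ((P.length : Nat) : Int) v := by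
    rw [List.length_take]
    omega
  rw [hmin]
  have hline : ((([' ', '|', ' '].length : Nat) : Int) * (min ((P.length : Nat) : Int) v - 1) +
      (([' ', '|'].length : Nat) : Int) + ((['|', ' '].length : Nat) : Int) +
      M * min ((P.length : Nat) : Int) v)
      = (3 * (min ((P.length : Nat) : Int) v - 1) + 4 + M * min ((P.length : Nat) : Int) v) := by
    simp only [List.length_cons, List.length_nil]
    push_cast
    ring
  rw [hline]
  set L : List Char := List.replicate (3 * (min ((P.length : Nat) : Int) v - 1) + 4 + M * min ((P.length : Nat) : Int) v).toNat '-' with hL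
  rw [pvFoldA0 P v hv (L ++ ['\n', '|', ' '])]
  rw [pvRows_chunks v hv P.length P rfl]
  rw [show (fun row => ['|', ' '] ++ PySem.Chars.join [] (List.map (fun v => v ++ [' ', '|', ' ']) row))
      = (fun r => ['|', ' '] ++ pvCells r) from by funext r; rw [pvCells]]
  have hchunks := pvRecDown_chunks v.toNat (by omega) P.length P rfl hPne
  set J : List Char := PySem.Chars.join ['\n'] ((pvChunks v.toNat P).map (fun r => ['|', ' '] ++ pvCells r)) with hJ
  have hshuffle : (L ++ ['\n', '|', ' ']) ++ pvRecDown v.toNat P v.toNat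
      = L ++ '\n' :: (['|', ' '] ++ pvRecDown v.toNat P v.toNat) := by simp
  by_cases hd : v.toNat ∣ P.length
  · have hcond : (PySem.Int.mod ((P.length : Nat) : Int) v = 0 ∧ v ≤ ((P.length : Nat) : Int)) :=
      ⟨(pvModZero_iff v hv P.length).mpr hd, by have := Nat.le_of_dvd hPpos hd; omega⟩
    rw [if_pos hcond]
    rw [if_pos hd] at hchunks
    have hX : (L ++ ['\n', '|', ' ']) ++ pvRecDown v.toNat P v.toNat
        = (L ++ '\n' :: J) ++ ['\n', '|', ' '] := by
      rw [hshuffle, hchunks]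
      simp
    rw [hX]
    rw [show (-((['\n', '|', ' '].length : Nat) : Int)) = ((-3 : Int)) from by norm_num]
    rw [PySem.List.slice_to_neg_ofNat _ 3 (by norm_num)]
    rw [show ((L ++ '\n' :: J) ++ ['\n', '|', ' ']).length - 3 = (L ++ '\n' :: J).length from by
      simp [List.length_append]; omega]
    rw [List.take_left]
    simp
  · have hcond : ¬ (PySem.Int.mod ((P.length : Nat) : Int) v = 0 ∧ v ≤ ((P.length : Nat) : Int)) := by
      intro hc
      exact hd ((pvModZero_iff v hv P.length).mp hc.1)
    rw [if_neg hcond]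
    rw [if_neg hd] at hchunks
    rw [hshuffle, hchunks]
    simp
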